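-- pv_equiv track=rewrite | github.com/DarkmatterVale/regex4dummies | regex4dummies/nltk_parser.py | find_prepositional_phrases
-- ===== SOURCE A (Python) =====
-- def find_prepositional_phrases( capitalized_sentence, raw_sentence, tagged_sentence ):
--     prepositional_phrases = ""
--
--     for index in range( 0, len( tagged_sentence ) ):
--         # Removing prepositions
--         if "IN" in tagged_sentence[ index ][ 1 ]:
--             for prep_index in range( index, len( tagged_sentence ) ):
--                 if "NN" in tagged_sentence[ prep_index ][ 1 ]:
--                     if index != 0:
--                         temporary_phrase = ""
--                         for phrase_index in range( index, prep_index + 1 ):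
--                             temporary_phrase += " " + tagged_sentence[ phrase_index ][ 0 ]
--
--                         if temporary_phrase not in prepositional_phrases:
--                             prepositional_phrases += temporary_phrase + "..."
--
--                     break
--
--     return prepositional_phrases
-- ===== SOURCE B (Python) =====
-- def find_prepositional_phrases(capitalized_sentence, raw_sentence, tagged_sentence):
--     # Precompute, right-to-left, the index of the next "NN"-tagged token at or
--     # after each position; then a single left-to-right pass builds the output.
--     n = len(tagged_sentence)
--     next_nn = [None] * n
--     last = None
--     for i in range(n - 1, -1, -1):
--         if "NN" in tagged_sentence[i][1]:
--             last = i
--         next_nn[i] = last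
--     result = ""
--     for i, (word, tags) in enumerate(tagged_sentence):
--         if i != 0 and "IN" in tags and next_nn[i] is not None:
--             phrase = "".join(" " + w for w, _ in tagged_sentence[i:next_nn[i] + 1])
--             if phrase not in result:
--                 result += phrase + "..."
--     return result
-- ===== Notes on version B (the rewrite author's own statement) =====
-- stated objective: alternative
-- what changed: A rescans forward from every preposition to find the next NN tag; B precomputes a next-NN index table in one right-to-left pass, builds each phrase from a slice via join, and folds the candidates into the output in a single enumerate pass.
import Mathlib
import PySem

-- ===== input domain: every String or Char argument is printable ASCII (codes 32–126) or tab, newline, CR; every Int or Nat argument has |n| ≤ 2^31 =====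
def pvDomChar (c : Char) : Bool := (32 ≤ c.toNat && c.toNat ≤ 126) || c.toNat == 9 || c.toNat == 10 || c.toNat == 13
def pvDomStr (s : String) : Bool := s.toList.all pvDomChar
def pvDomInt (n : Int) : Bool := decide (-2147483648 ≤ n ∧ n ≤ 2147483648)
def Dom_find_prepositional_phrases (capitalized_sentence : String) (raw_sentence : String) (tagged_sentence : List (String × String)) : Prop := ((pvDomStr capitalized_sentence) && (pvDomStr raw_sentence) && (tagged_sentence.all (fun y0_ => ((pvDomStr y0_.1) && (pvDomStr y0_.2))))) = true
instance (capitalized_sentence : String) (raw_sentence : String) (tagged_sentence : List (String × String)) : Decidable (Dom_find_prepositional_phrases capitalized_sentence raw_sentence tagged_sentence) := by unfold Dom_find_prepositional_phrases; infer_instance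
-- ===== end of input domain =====

-- B replaces A's per-preposition forward scan for the next "NN" token by a table
-- precomputed in one right-to-left pass, and builds each phrase from a slice
-- (objective: alternative decomposition, same results).

-- ===== PORT A =====
-- innermost loop: temporary_phrase += " " + tagged_sentence[phrase_index][0]
def pvPhraseA (ts : List (String × String)) (index j : Int) : String :=
  (PySem.List.pyRange index (j + 1) 1).foldl
    (fun tp k => tp ++ " " ++ (PySem.List.pyGetD ts k ("", "")).1) ""

-- middle loop over prep_index, with its break
def pvInnerA (ts : List (String × String)) (index : Int) (acc : String) : List Int → String
  | [] => acc
  | j :: rest =>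
    if PySem.Str.isIn "NN" (PySem.List.pyGetD ts j ("", "")).2 then
      if index ≠ 0 then
        let tp := pvPhraseA ts index j
        if PySem.Str.isIn tp acc then acc else acc ++ tp ++ "..."
      else acc
    else pvInnerA ts index acc rest

def find_prepositional_phrases (capitalized_sentence : String) (raw_sentence : String) (tagged_sentence : List (String × String)) : String :=
  (PySem.List.pyRange 0 (tagged_sentence.length : Int) 1).foldl
    (fun acc i =>
      if PySem.Str.isIn "IN" (PySem.List.pyGetD tagged_sentence i ("", "")).2 then
        pvInnerA tagged_sentence i acc (PySem.List.pyRange i (tagged_sentence.length : Int) 1)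
      else acc) ""

-- ===== PORT B =====
-- right-to-left pass: next_nn[i] = index of the first "NN"-tagged token at position ≥ i
def pvNextNN : Nat → List (String × String) → List (Option Nat)
  | _, [] => []
  | i, p :: rest =>
    let restL := pvNextNN (i + 1) rest
    (if PySem.Str.isIn "NN" p.2 then some i else restL.headD none) :: restL

def find_prepositional_phrases_alt (capitalized_sentence : String) (raw_sentence : String) (tagged_sentence : List (String × String)) : String :=
  let nn := pvNextNN 0 tagged_sentence
  (PySem.List.enumerate tagged_sentence).foldl
    (fun acc p =>
      if p.1 != (0 : Int) && PySem.Str.isIn "IN" p.2.2 then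
        match PySem.List.pyGetD nn p.1 none with
        | some j =>
          let phrase := PySem.Str.join ""
            ((PySem.List.slice tagged_sentence (some p.1) (some ((j : Int) + 1))).map (fun q => " " ++ q.1))
          if PySem.Str.isIn phrase acc then acc else acc ++ phrase ++ "..."
        | none => acc
      else acc) ""

-- ===== PRECONDITION & SPEC =====
def Spec_find_prepositional_phrases (capitalized_sentence : String) (raw_sentence : String) (tagged_sentence : List (String × String)) (out : String) : Prop := out = find_prepositional_phrases_alt capitalized_sentence raw_sentence tagged_sentence
instance (capitalized_sentence : String) (raw_sentence : String) (tagged_sentence : List (String × String)) (out : String) : Decidable (Spec_find_prepositional_phrases capitalized_sentence raw_sentence tagged_sentence out) := by unfold Spec_find_prepositional_phrases; infer_instance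

-- ===== CLAIM (what is proved, stated in full; the proofs are below) =====
def Claim_equal_find_prepositional_phrases : Prop := ∀ (capitalized_sentence : String) (raw_sentence : String) (tagged_sentence : List (String × String)), Dom_find_prepositional_phrases capitalized_sentence raw_sentence tagged_sentence → Spec_find_prepositional_phrases capitalized_sentence raw_sentence tagged_sentence (find_prepositional_phrases capitalized_sentence raw_sentence tagged_sentence)

-- ===== LEMMAS AND PROOFS =====

-- proof-side vocabulary
def pvTagNN (p : String × String) : Bool := PySem.Str.isIn "NN" p.2

-- first index j ≥ k whose tag contains "NN"
def pvFindNN (ts : List (String × String)) (k : Nat) : Option Nat :=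
  (List.findIdx? pvTagNN (ts.drop k)).map (· + k)

-- the phrase " w_k … w_j", slice form
def pvPhraseS (ts : List (String × String)) (k j : Nat) : String :=
  PySem.Str.join "" (((ts.drop k).take (j + 1 - k)).map (fun q => " " ++ q.1))

-- common per-index step both programs implement
def pvStep (ts : List (String × String)) (acc : String) (k : Nat) : String :=
  if k ≠ 0 ∧ PySem.Str.isIn "IN" (ts.getD k ("", "")).2 = true then
    match pvFindNN ts k with
    | some j =>
      let ph := pvPhraseS ts k j
      if PySem.Str.isIn ph acc then acc else acc ++ ph ++ "..."
    | none => acc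
  else acc

theorem pv_join_empty_cons (a : String) (l : List String) :
    PySem.Str.join "" (a :: l) = a ++ PySem.Str.join "" l := by
  cases l <;> simp [PySem.Str.join, PySem.Chars.join_singleton, PySem.Chars.join_cons_cons]

theorem pv_findNN_bounds {ts : List (String × String)} {k j : Nat}
    (h : pvFindNN ts k = some j) : k ≤ j ∧ j < ts.length := by
  unfold pvFindNN at h
  rcases Option.map_eq_some_iff.mp h with ⟨i, hi, rfl⟩
  have hlt : i < (ts.drop k).length := (List.findIdx?_eq_some_iff_findIdx_eq.mp hi).1
  simp [List.length_drop] at hlt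
  omega

theorem pv_phrase_aux (ts : List (String × String)) (j : Nat) (hj : j < ts.length) :
    ∀ d k acc, k + d = j + 1 →
      (PySem.List.pyRange (k : Int) ((j : Int) + 1) 1).foldl
        (fun tp x => tp ++ " " ++ (PySem.List.pyGetD ts x ("", "")).1) acc
      = acc ++ pvPhraseS ts k j := by
  intro d
  induction d with
  | zero =>
    intro k acc hk
    have : k = j + 1 := by omega
    subst this
    rw [PySem.List.pyRange_one_eq_nil (by push_cast; omega)]
    simp [pvPhraseS, PySem.Str.join, PySem.Chars.join_nil]
  | succ d ih =>
    intro k acc hk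
    have hklen : k < ts.length := by omega
    rw [PySem.List.pyRange_one_cons (by push_cast; omega)]
    simp only [List.foldl_cons]
    have : ((k : Int) + 1) = ((k + 1 : Nat) : Int) := by push_cast; ring
    rw [this, ih (k+1) _ (by omega)]
    rw [PySem.List.pyGetD_natCast, List.getD_eq_getElem ts _ hklen]
    unfold pvPhraseS
    rw [List.drop_eq_getElem_cons hklen]
    have h2 : j + 1 - k = (j - k) + 1 := by omega
    have h3 : j + 1 - (k+1) = j - k := by omega
    rw [h2, h3, List.take_succ_cons, List.map_cons, pv_join_empty_cons]
    simp [String.append_assoc]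

-- A's innermost loop builds the slice-form phrase
theorem pv_phraseA_eq (ts : List (String × String)) (k j : Nat)
    (hk : k ≤ j) (hj : j < ts.length) :
    pvPhraseA ts (k : Int) (j : Int) = pvPhraseS ts k j := by
  have := pv_phrase_aux ts j hj (j + 1 - k) k "" (by omega)
  unfold pvPhraseA
  rw [this]
  simp

-- A's middle loop is the first-NN search
theorem pv_innerA_aux (ts : List (String × String)) (idx : Int) (acc : String) :
    ∀ d k, k + d = ts.length →
    pvInnerA ts idx acc (PySem.List.pyRange (k : Int) (ts.length : Int) 1) =
      match pvFindNN ts k with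
      | some j =>
        if idx ≠ 0 then
          (if PySem.Str.isIn (pvPhraseA ts idx (j : Int)) acc then acc
           else acc ++ pvPhraseA ts idx (j : Int) ++ "...")
        else acc
      | none => acc := by
  intro d
  induction d with
  | zero =>
    intro k hk
    rw [PySem.List.pyRange_one_eq_nil (by omega)]
    have : ts.drop k = [] := by rw [List.drop_eq_nil_iff]; omega
    simp [pvInnerA, pvFindNN, this]
  | succ d ih =>
    intro k hk
    have hklen : k < ts.length := by omega
    rw [PySem.List.pyRange_one_cons (by push_cast; omega)]
    have hdrop : ts.drop k = ts[k] :: ts.drop (k+1) := List.drop_eq_getElem_cons hklen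
    rw [pvInnerA]
    rw [PySem.List.pyGetD_natCast, List.getD_eq_getElem ts _ hklen]
    by_cases hnn : PySem.Str.isIn "NN" ts[k].2 = true
    · rw [if_pos hnn]
      have heq : pvTagNN ts[k] = true := by simpa [pvTagNN] using hnn
      have : pvFindNN ts k = some k := by
        unfold pvFindNN
        rw [hdrop, List.findIdx?_cons]
        simp [heq]
      rw [this]
    · rw [if_neg hnn]
      have hcast : ((k : Int) + 1) = ((k + 1 : Nat) : Int) := by push_cast; ring
      rw [hcast, ih (k+1) (by omega)]
      have : pvFindNN ts k = pvFindNN ts (k+1) := by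
        unfold pvFindNN
        rw [hdrop, List.findIdx?_cons]
        have heq : pvTagNN ts[k] = false := by simpa [pvTagNN] using hnn
        simp only [heq, Bool.false_eq_true, if_false, Option.map_map]
        congr 1
        funext i
        simp [Function.comp]; omega
      rw [this]

-- B's table lookup is the first-NN search
theorem pv_nextNN_getD (ts : List (String × String)) :
    ∀ s k, (pvNextNN s ts).getD k none =
      (List.findIdx? pvTagNN (ts.drop k)).map (· + (s + k)) := by
  induction ts with
  | nil => intro s k; simp [pvNextNN]
  | cons p rest ih =>
    intro s k
    cases k with
    | zero =>
      show (pvNextNN s (p :: rest)).getD 0 none = _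
      rw [pvNextNN]
      simp only [List.getD_cons_zero, List.drop_zero, List.findIdx?_cons]
      by_cases hnn : PySem.Str.isIn "NN" p.2 = true
      · have heq : pvTagNN p = true := by simpa [pvTagNN] using hnn
        simp only [hnn, if_true, heq]
        simp
      · have heq : pvTagNN p = false := by simpa [pvTagNN] using hnn
        have hh : (pvNextNN (s+1) rest).headD none = (pvNextNN (s+1) rest).getD 0 none := by
          cases pvNextNN (s+1) rest <;> simp
        simp only [hnn, if_false, heq, Bool.false_eq_true, Option.map_map]
        rw [hh, ih (s+1) 0]
        simp only [List.drop_zero]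
        congr 1
        funext i
        simp [Function.comp]; omega
    | succ k' =>
      show (pvNextNN s (p :: rest)).getD (k'+1) none = _
      rw [pvNextNN]
      simp only [List.getD_cons_succ, List.drop_succ_cons]
      rw [ih (s+1) k']
      congr 1
      funext i
      omega

theorem pv_A_eq_fold (ts : List (String × String)) (cap raw : String) :
    find_prepositional_phrases cap raw ts = (List.range ts.length).foldl (pvStep ts) "" := by
  unfold find_prepositional_phrases
  rw [show ((0:Int) = ((0:Nat) : Int)) from rfl, PySem.List.pyRange_one]
  simp only [List.foldl_map]
  apply PySem.List.foldl_congr_mem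
  intro acc k hkmem
  have hklen : k < ts.length := List.mem_range.mp hkmem
  simp only [Nat.cast_zero, zero_add]
  rw [PySem.List.pyGetD_natCast]
  by_cases hin : PySem.Str.isIn "IN" (ts.getD k ("", "")).2 = true
  · rw [if_pos hin]
    rw [pv_innerA_aux ts (k : Int) acc (ts.length - k) k (by omega)]
    unfold pvStep
    by_cases hk0 : k = 0
    · subst hk0
      cases h : pvFindNN ts 0 <;> simp
    · rcases h : pvFindNN ts k with _ | j
      · simp
      · obtain ⟨hkj, hjlen⟩ := pv_findNN_bounds h
        have hinC : PySem.Chars.isIn ['I','N'] (ts[k]?.getD ("","")).2.toList = true := by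
          simpa using hin
        simp [pv_phraseA_eq ts k j hkj hjlen, hk0, hinC, Int.natCast_eq_zero]
  · rw [if_neg hin]
    unfold pvStep
    rw [if_neg (fun hc => hin hc.2)]

theorem pv_B_eq_fold (ts : List (String × String)) (cap raw : String) :
    find_prepositional_phrases_alt cap raw ts = (List.range ts.length).foldl (pvStep ts) "" := by
  unfold find_prepositional_phrases_alt
  rw [PySem.List.enumerate_eq_map_pyRange ts ("", "")]
  simp only [PySem.List.len_eq]
  rw [show ((0:Int) = ((0:Nat) : Int)) from rfl, PySem.List.pyRange_one]
  simp only [List.foldl_map]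
  apply PySem.List.foldl_congr_mem
  intro acc k hkmem
  have hklen : k < ts.length := List.mem_range.mp hkmem
  simp only [Nat.cast_zero, zero_add]
  rw [PySem.List.pyGetD_natCast, PySem.List.pyGetD_natCast]
  rw [pv_nextNN_getD ts 0 k]
  have hfind : (List.findIdx? pvTagNN (ts.drop k)).map (· + (0 + k)) = pvFindNN ts k := by
    unfold pvFindNN; congr 1; funext i; omega
  rw [hfind]
  unfold pvStep
  by_cases hk0 : k = 0
  · subst hk0
    cases h : pvFindNN ts 0 <;> simp
  · by_cases hin : PySem.Str.isIn "IN" (ts.getD k ("", "")).2 = true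
    · have hbool : (((k:Int)) != (0:Int) && PySem.Str.isIn "IN" (ts.getD k ("", "")).2) = true := by
        rw [hin, Bool.and_true]
        simp only [bne_iff_ne, ne_eq, Int.natCast_eq_zero]
        exact hk0
      rw [if_pos hbool, if_pos ⟨hk0, hin⟩]
      rcases h : pvFindNN ts k with _ | j
      · rfl
      · have hslice : PySem.List.slice ts (some (k:Int)) (some ((j:Int)+1)) = (ts.drop k).take (j+1-k) := by
          rw [PySem.List.slice_toNat ts (by omega) (by omega)]
          congr 1 <;> omega
        simp only [hslice]
        rfl
    · have hbool : (((k:Int)) != (0:Int) && PySem.Str.isIn "IN" (ts.getD k ("", "")).2) = false := by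
        cases hss : PySem.Str.isIn "IN" (ts.getD k ("", "")).2
        · simp
        · exact absurd hss hin
      rw [hbool]
      simp only [Bool.false_eq_true, if_false]
      rw [if_neg (fun hc => hin hc.2)]

-- ===== VERDICT (by name: the statement is the Claim_ definition above) =====
theorem find_prepositional_phrases_spec : Claim_equal_find_prepositional_phrases := by
  intro cap raw ts _
  unfold Spec_find_prepositional_phrases
  rw [pv_A_eq_fold, pv_B_eq_fold]
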